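-- pv_equiv track=rewrite | github.com/SerenityUX/message-yourself | CLI/export_imessage.py | _prior_to_openai_messages
-- ===== SOURCE A (Python) =====
-- def _merge_consecutive_bubbles(prior: list[tuple[bool, str]]) -> list[tuple[bool, str]]:
--     """Join back-to-back bubbles from the same side (like multiple gray or blue bubbles in a row)."""
--     if not prior:
--         return []
--     out: list[tuple[bool, str]] = []
--     for is_me, body in prior:
--         if out and out[-1][0] == is_me:
--             pm, pt = out[-1]
--             out[-1] = (pm, pt + "\n\n" + body)
--         else:
--             out.append((is_me, body))
--     return out
--
-- def _prior_to_openai_messages(prior: list[tuple[bool, str]]) -> list[dict[str, str]] | None: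
--     """
--     Map prior thread bubbles to the same alternating ``user`` / ``assistant`` list ``chat.py``
--     uses after the system prompt: ``user`` = incoming iMessage(s), ``assistant`` = Thomas.
--
--     Requires the last bubble before Thomas’s new reply to be from the other person (incoming),
--     so the model is always responding to a gray bubble. If we cannot form that, return None.
--     """
--     runs = _merge_consecutive_bubbles(prior)
--     while runs and runs[0][0]:
--         runs.pop(0)
--     if not runs:
--         return None
--     if runs[-1][0]:
--         return None
--     out: list[dict[str, str]] = []
--     for is_me, body in runs:
--         out.append(
--             {
--                 "role": "assistant" if is_me else "user",
--                 "content": body,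
--             }
--         )
--     return out
-- ===== SOURCE B (Python) =====
-- def _prior_to_openai_messages(prior: list[tuple[bool, str]]) -> list[dict[str, str]] | None:
--     """Single pass: skip leading Thomas bubbles, merge same-role runs in place,
--     and track the last emitted role; valid only if the thread ends on a user bubble."""
--     out: list[dict[str, str]] = []
--     last_role = None
--     for is_me, body in prior:
--         if last_role is None and is_me:
--             continue
--         role = "assistant" if is_me else "user"
--         if role == last_role:
--             out[-1]["content"] += "\n\n" + body
--         else:
--             out.append({"role": role, "content": body})
--         last_role = role
--     if last_role != "user":
--         return None
--     return out
-- ===== Notes on version B (the rewrite author's own statement) =====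
-- stated objective: simpler
-- what changed: Replaced the three-pass pipeline (merge helper building a tuple list, a pop(0) loop stripping leading assistant bubbles, then a mapping loop to dicts) by one pass over prior that builds the dict list directly, tracking only the last emitted role.
import Mathlib
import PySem

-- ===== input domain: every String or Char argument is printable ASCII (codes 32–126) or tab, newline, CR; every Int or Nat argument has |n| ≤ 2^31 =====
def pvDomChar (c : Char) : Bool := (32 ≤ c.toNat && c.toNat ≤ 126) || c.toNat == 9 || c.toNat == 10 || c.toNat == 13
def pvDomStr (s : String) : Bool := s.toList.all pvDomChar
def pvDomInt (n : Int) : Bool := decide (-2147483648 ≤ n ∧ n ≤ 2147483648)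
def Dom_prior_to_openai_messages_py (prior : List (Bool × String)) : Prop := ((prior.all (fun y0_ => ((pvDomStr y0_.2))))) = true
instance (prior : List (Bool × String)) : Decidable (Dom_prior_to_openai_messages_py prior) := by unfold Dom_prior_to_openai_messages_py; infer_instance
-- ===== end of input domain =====

-- B replaces A's three passes (merge-runs helper, leading-pop loop, dict-mapping loop)
-- by one pass that builds the dict list directly, tracking the last emitted role.

-- ===== PORT A =====
-- one iteration of _merge_consecutive_bubbles' loop
def pvMergeStep (out : List (Bool × String)) (p : Bool × String) : List (Bool × String) :=
  match out.getLast? with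
  | some (pm, pt) =>
      if pm == p.1 then out.dropLast ++ [(pm, pt ++ "\n\n" ++ p.2)]
      else out ++ [p]
  | none => out ++ [p]

def pvMergeConsecutive (prior : List (Bool × String)) : List (Bool × String) :=
  if prior.isEmpty then [] else prior.foldl pvMergeStep []

-- 'while runs and runs[0][0]: runs.pop(0)'
def pvDropLeading : List (Bool × String) → List (Bool × String)
  | [] => []
  | p :: rest => if p.1 then pvDropLeading rest else p :: rest

def prior_to_openai_messages_py (prior : List (Bool × String)) : Option (List (List (String × String))) :=
  let runs := pvDropLeading (pvMergeConsecutive prior)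
  match runs.getLast? with
  | none => none          -- 'if not runs: return None'
  | some p =>
    if p.1 then none      -- 'if runs[-1][0]: return None'
    else some (runs.foldl (fun out q =>
      out ++ [[("role", if q.1 then "assistant" else "user"), ("content", q.2)]]) [])

-- ===== PORT B =====
-- one iteration of B's single loop; state = (out, last_role)
def pvAltStep (st : List (List (String × String)) × Option String) (p : Bool × String) :
    List (List (String × String)) × Option String :=
  if st.2 = none ∧ p.1 then st
  else
    let role := if p.1 then "assistant" else "user"
    if st.2 = some role then
      match st.1.getLast? with
      -- out[-1]["content"] += "\n\n" + body: update the value in place, key order kept (exact)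
      | some d => (st.1.dropLast ++
          [d.map (fun kv => if kv.1 == "content" then (kv.1, kv.2 ++ "\n\n" ++ p.2) else kv)],
          some role)
      | none => (st.1, some role)  -- unreachable: last_role ≠ None implies out nonempty
    else (st.1 ++ [[("role", role), ("content", p.2)]], some role)

def prior_to_openai_messages_py_alt (prior : List (Bool × String)) : Option (List (List (String × String))) :=
  let st := prior.foldl pvAltStep ([], none)
  if st.2 ≠ some "user" then none else some st.1

-- ===== PRECONDITION & SPEC =====
def Spec_prior_to_openai_messages_py (prior : List (Bool × String)) (out : Option (List (List (String × String)))) : Prop := out = prior_to_openai_messages_py_alt prior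
instance (prior : List (Bool × String)) (out : Option (List (List (String × String)))) : Decidable (Spec_prior_to_openai_messages_py prior out) := by unfold Spec_prior_to_openai_messages_py; infer_instance

-- ===== CLAIM (what is proved, stated in full; the proofs are below) =====
def Claim_equal_prior_to_openai_messages_py : Prop := ∀ (prior : List (Bool × String)), Dom_prior_to_openai_messages_py prior → Spec_prior_to_openai_messages_py prior (prior_to_openai_messages_py prior)

-- ===== LEMMAS AND PROOFS =====

-- run-merging written head-recursively; both ports are related to this
def pvMergeFrom (b : Bool) (s : String) : List (Bool × String) → List (Bool × String)
  | [] => [(b, s)]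
  | (b', s') :: t => if b' = b then pvMergeFrom b (s ++ "\n\n" ++ s') t
                     else (b, s) :: pvMergeFrom b' s' t

def pvRole (b : Bool) : String := if b then "assistant" else "user"
def pvDict (b : Bool) (s : String) : List (String × String) := [("role", pvRole b), ("content", s)]

theorem pvMergeFoldA : ∀ (l acc : List (Bool × String)) (b : Bool) (s : String),
    List.foldl pvMergeStep (acc ++ [(b, s)]) l = acc ++ pvMergeFrom b s l := by
  intro l
  induction l with
  | nil => intro acc b s; simp [pvMergeFrom]
  | cons p t ih =>
    intro acc b s
    obtain ⟨b', s'⟩ := p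
    by_cases hb : b' = b
    · subst hb
      have hstep : pvMergeStep (acc ++ [(b', s)]) (b', s') = acc ++ [(b', s ++ "\n\n" ++ s')] := by
        simp [pvMergeStep]
      rw [List.foldl_cons, hstep, ih acc b' (s ++ "\n\n" ++ s')]
      simp [pvMergeFrom]
    · have hstep : pvMergeStep (acc ++ [(b, s)]) (b', s') = (acc ++ [(b, s)]) ++ [(b', s')] := by
        simp [pvMergeStep]
        intro h; exact absurd h.symm hb
      rw [List.foldl_cons, hstep, ih (acc ++ [(b, s)]) b' s']
      simp [pvMergeFrom, hb]

theorem pvMerge_cons (b : Bool) (s : String) (t : List (Bool × String)) :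
    pvMergeConsecutive ((b, s) :: t) = pvMergeFrom b s t := by
  have h := pvMergeFoldA t [] b s
  simpa [pvMergeConsecutive, pvMergeStep] using h

theorem pvMergeFrom_ne_nil (b : Bool) (s : String) (l : List (Bool × String)) :
    pvMergeFrom b s l ≠ [] := by
  induction l generalizing b s with
  | nil => simp [pvMergeFrom]
  | cons p t ih =>
    obtain ⟨b', s'⟩ := p
    simp only [pvMergeFrom]
    split
    · exact ih _ _
    · simp

-- the last side of the merged runs is the last side of the input
theorem pvMergeFrom_getLast_fst : ∀ (l : List (Bool × String)) (b : Bool) (s : String),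
    (pvMergeFrom b s l).getLast?.map Prod.fst = some (l.foldl (fun _ p => p.1) b) := by
  intro l
  induction l with
  | nil => intro b s; simp [pvMergeFrom]
  | cons p t ih =>
    intro b s
    obtain ⟨b', s'⟩ := p
    by_cases hb : b' = b
    · simp only [pvMergeFrom, if_pos hb, List.foldl_cons]
      subst hb; exact ih b' _
    · simp only [pvMergeFrom, if_neg hb, List.foldl_cons, List.getLast?_cons]
      have h := ih b' s'
      rcases hgl : (pvMergeFrom b' s' t).getLast? with _ | q
      · rw [List.getLast?_eq_none_iff] at hgl
        exact absurd hgl (pvMergeFrom_ne_nil _ _ _)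
      · rw [hgl] at h
        simpa using h

theorem pvMergeFrom_head_fst : ∀ (l : List (Bool × String)) (b : Bool) (s : String),
    (pvMergeFrom b s l).head?.map Prod.fst = some b := by
  intro l
  induction l with
  | nil => intro b s; simp [pvMergeFrom]
  | cons p t ih =>
    intro b s
    obtain ⟨b', s'⟩ := p
    simp only [pvMergeFrom]
    split
    · exact ih b _
    · simp

theorem pvDropLeading_false (l : List (Bool × String)) (s : String)
    (h : (pvMergeFrom false s l).head?.map Prod.fst = some false) :
    pvDropLeading (pvMergeFrom false s l) = pvMergeFrom false s l := by
  rcases hmf : pvMergeFrom false s l with _ | ⟨q, r⟩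
  · rfl
  · rw [hmf] at h
    simp only [List.head?_cons, Option.map_some, Option.some_inj] at h
    simp [pvDropLeading, h]

-- dropping leading 'me' bubbles commutes with merging
theorem pvDrop_merge_true : ∀ (l : List (Bool × String)) (s : String),
    pvDropLeading (pvMergeFrom true s l) =
      (match l.dropWhile (·.1) with
       | [] => []
       | (_, s') :: t => pvMergeFrom false s' t) := by
  intro l
  induction l with
  | nil => intro s; simp [pvMergeFrom, pvDropLeading]
  | cons p t ih =>
    intro s
    obtain ⟨b', s'⟩ := p
    cases b' with
    | true =>
      have h1 : pvMergeFrom true s ((true, s') :: t) = pvMergeFrom true (s ++ "\n\n" ++ s') t := by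
        simp [pvMergeFrom]
      rw [h1, ih]
      simp [List.dropWhile]
    | false =>
      have h1 : pvMergeFrom true s ((false, s') :: t) = (true, s) :: pvMergeFrom false s' t := by
        simp [pvMergeFrom]
      rw [h1]
      have h2 : pvDropLeading ((true, s) :: pvMergeFrom false s' t)
          = pvDropLeading (pvMergeFrom false s' t) := by simp [pvDropLeading]
      rw [h2, pvDropLeading_false t s' (pvMergeFrom_head_fst t false s')]
      simp [List.dropWhile]

theorem pvFlattenSingleton {α β : Type} (f : α → β) : ∀ (l : List α),
    (l.map (fun x => [f x])).flatten = l.map f := by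
  intro l; induction l with
  | nil => rfl
  | cons x t ih => simp [ih]

theorem pvRole_eq_iff (b b' : Bool) : pvRole b = pvRole b' ↔ b = b' := by
  cases b <;> cases b' <;> simp [pvRole]

-- B's loop after the first user bubble tracks the merged runs
theorem pvFoldB_lem : ∀ (l : List (Bool × String)) (acc : List (List (String × String)))
    (b : Bool) (s : String),
    List.foldl pvAltStep (acc ++ [pvDict b s], some (pvRole b)) l
      = (acc ++ (pvMergeFrom b s l).map (fun q => pvDict q.1 q.2),
         some (pvRole (l.foldl (fun _ p => p.1) b))) := by
  intro l
  induction l with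
  | nil => intro acc b s; simp [pvMergeFrom, pvDict]
  | cons p t ih =>
    intro acc b s
    obtain ⟨b', s'⟩ := p
    by_cases hb : b' = b
    · subst hb
      have hstep : pvAltStep (acc ++ [pvDict b' s], some (pvRole b')) (b', s')
          = (acc ++ [pvDict b' (s ++ "\n\n" ++ s')], some (pvRole b')) := by
        simp only [pvAltStep]
        rw [if_neg (by simp)]
        rw [if_pos (by cases b' <;> simp [pvRole])]
        simp [pvDict, pvRole]
      rw [List.foldl_cons, hstep, ih acc b' (s ++ "\n\n" ++ s')]
      simp [pvMergeFrom]
    · have hstep : pvAltStep (acc ++ [pvDict b s], some (pvRole b)) (b', s')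
          = ((acc ++ [pvDict b s]) ++ [pvDict b' s'], some (pvRole b')) := by
        simp only [pvAltStep]
        rw [if_neg (by simp)]
        rw [if_neg (by
          intro h
          have : pvRole b = pvRole b' := by
            cases b' <;> simpa [pvRole] using h
          exact hb ((pvRole_eq_iff b b').mp this).symm)]
        simp [pvDict, pvRole]
      rw [List.foldl_cons, hstep, ih (acc ++ [pvDict b s]) b' s']
      simp [pvMergeFrom, hb]

-- B's loop including the skipping phase
theorem pvFoldB_skip : ∀ (l : List (Bool × String)),
    List.foldl pvAltStep ([], none) l =
      (match l.dropWhile (·.1) with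
       | [] => (([] : List (List (String × String))), (none : Option String))
       | (_, s') :: t => ((pvMergeFrom false s' t).map (fun q => pvDict q.1 q.2),
           some (pvRole (t.foldl (fun _ p => p.1) false)))) := by
  intro l
  induction l with
  | nil => simp
  | cons p t ih =>
    obtain ⟨b', s'⟩ := p
    cases b' with
    | true =>
      have hstep : pvAltStep ([], none) (true, s') = ([], none) := by
        simp [pvAltStep]
      rw [List.foldl_cons, hstep, ih]
      simp [List.dropWhile]
    | false =>
      have hstep : pvAltStep ([], none) (false, s') = ([pvDict false s'], some (pvRole false)) := by
        simp [pvAltStep, pvDict, pvRole]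
      rw [List.foldl_cons, hstep]
      have h := pvFoldB_lem t [] false s'
      simp only [List.nil_append] at h
      rw [h]
      simp [List.dropWhile]

-- ===== VERDICT (by name: the statement is the Claim_ definition above) =====
theorem prior_to_openai_messages_py_spec : Claim_equal_prior_to_openai_messages_py := by
  intro prior _
  unfold Spec_prior_to_openai_messages_py
  simp only [prior_to_openai_messages_py, prior_to_openai_messages_py_alt]
  rw [pvFoldB_skip]
  cases prior with
  | nil => rfl
  | cons p t =>
    obtain ⟨b, s⟩ := p
    rw [pvMerge_cons]
    have hA : pvDropLeading (pvMergeFrom b s t) =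
        (match ((b, s) :: t).dropWhile (·.1) with
         | [] => []
         | (_, s') :: t' => pvMergeFrom false s' t') := by
      cases b with
      | true =>
        rw [pvDrop_merge_true]
        simp [List.dropWhile]
      | false =>
        rw [pvDropLeading_false t s (pvMergeFrom_head_fst t false s)]
        simp [List.dropWhile]
    rw [hA]
    rcases hdw : ((b, s) :: t).dropWhile (·.1) with _ | ⟨⟨b0, s0⟩, t0⟩
    · rw [hdw]
      simp
    · rw [hdw]
      simp only []
      have hlast := pvMergeFrom_getLast_fst t0 false s0
      rcases hgl : (pvMergeFrom false s0 t0).getLast? with _ | q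
      · rw [List.getLast?_eq_none_iff] at hgl
        exact absurd hgl (pvMergeFrom_ne_nil _ _ _)
      · rw [hgl] at hlast
        simp only [Option.map_some, Option.some_inj] at hlast
        by_cases hq : q.1 = true
        · simp [hq, ← hlast, pvRole]
        · simp only [Bool.not_eq_true] at hq
          simp [hq, ← hlast, pvRole, pvDict]
          exact pvFlattenSingleton _ (pvMergeFrom false s0 t0)
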